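-- pv_equiv track=rewrite | github.com/Wujian-sinemedia/Lemons | util/doxygen/scripts/process_cmake_module.py | process_module_includes
-- ===== SOURCE A (Python) =====
-- def process_module_includes (orig_content):
-- 	output_lines = []
-- 	inIncludesSection = False
--
-- 	for line in orig_content.splitlines():
-- 		if line.startswith ("## Includes:"):
-- 			inIncludesSection = True
-- 			output_lines.append (line)
-- 			continue
-- 		elif inIncludesSection:
-- 			if not line.startswith ("-"):
-- 				inIncludesSection = False
--
-- 		if inIncludesSection:
-- 			include = line[1:].strip()
-- 			line = "- [{n}](@ref {n})".format(n=include)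
--
-- 		output_lines.append (line)
--
-- 	return "\r\n".join(output_lines)
-- ===== SOURCE B (Python) =====
-- def process_module_includes(orig_content):
--     # Stage 1: split the lines into header-delimited segments.
--     segs = [[]]
--     for line in orig_content.splitlines():
--         if line.startswith("## Includes:"):
--             segs.append([line])
--         else:
--             segs[-1].append(line)
--     # Stage 2: in each header segment, reformat the leading dash run after the header.
--     out = list(segs[0])
--     for seg in segs[1:]:
--         k = 1
--         while k < len(seg) and seg[k].startswith("-"):
--             k += 1
--         out += seg[:1] + ["- [{n}](@ref {n})".format(n=s[1:].strip()) for s in seg[1:k]] + seg[k:]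
--     return "\r\n".join(out)
-- ===== Notes on version B (the rewrite author's own statement) =====
-- stated objective: alternative
-- what changed: Replaces A's single stateful pass (a boolean in-section flag deciding per line) with two staged passes: first split the lines into header-delimited segments, then rebuild the output per segment by reformatting each segment's leading dash run found with a counter and slices.
import Mathlib
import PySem

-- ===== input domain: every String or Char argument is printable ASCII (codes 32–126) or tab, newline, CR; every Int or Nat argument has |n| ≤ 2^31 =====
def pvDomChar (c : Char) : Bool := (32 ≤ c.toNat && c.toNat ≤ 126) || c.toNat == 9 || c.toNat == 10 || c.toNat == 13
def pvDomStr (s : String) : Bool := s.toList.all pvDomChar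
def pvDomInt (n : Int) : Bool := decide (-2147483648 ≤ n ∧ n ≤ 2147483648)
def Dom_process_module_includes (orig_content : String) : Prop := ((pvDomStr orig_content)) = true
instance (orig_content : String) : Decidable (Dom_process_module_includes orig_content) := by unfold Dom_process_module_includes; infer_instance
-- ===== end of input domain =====

-- B replaces A's single stateful pass (boolean in-section flag) with two staged passes:
-- split the lines into header-delimited segments, then rebuild each segment by slicing out
-- and reformatting its leading dash run (objective: alternative decomposition, same cost).


-- '"- [{n}](@ref {n})".format(n=line[1:].strip())' — the formatting expression both Pythons share
def pvFmtInc (line : String) : String :=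
  let n := PySem.Str.strip (PySem.Str.slice line (some 1) none)
  "- [" ++ n ++ "](@ref " ++ n ++ ")"

-- ===== PORT A =====
-- A's loop: fold over splitlines with state (output_lines, inIncludesSection)
def pvStepA (st : List String × Bool) (line : String) : List String × Bool :=
  if PySem.Str.startswith line "## Includes:" then (st.1 ++ [line], true)
  else
    let flag := if st.2 ∧ ¬ (PySem.Str.startswith line "-" = true) then false else st.2
    let line' := if flag then pvFmtInc line else line
    (st.1 ++ [line'], flag)

def process_module_includes (orig_content : String) : String :=
  PySem.Str.join "\r\n" (((PySem.Str.splitlines orig_content).foldl pvStepA ([], false)).1)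

-- ===== PORT B =====
-- Source B stage 1: 'segs.append([line])' / 'segs[-1].append(line)'
def pvAppendLast (segs : List (List String)) (l : String) : List (List String) :=
  match segs with
  | [] => []            -- unreachable: segs starts as [[]] and never shrinks (Python would raise here)
  | [s] => [s ++ [l]]
  | s :: rest => s :: pvAppendLast rest l

def pvSegStep (segs : List (List String)) (l : String) : List (List String) :=
  if PySem.Str.startswith l "## Includes:" then segs ++ [[l]]
  else pvAppendLast segs l

-- Source B stage 2: the 'while k < len(seg) and seg[k].startswith("-"): k += 1' counter
def pvCountDash (seg : List String) (k : Nat) : Nat :=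
  if h : k < seg.length then
    if PySem.Str.startswith seg[k] "-" then pvCountDash seg (k + 1) else k
  else k
termination_by seg.length - k

-- 'seg[:1] + [fmt(s) for s in seg[1:k]] + seg[k:]'
def pvProcSeg (seg : List String) : List String :=
  let k := pvCountDash seg 1
  PySem.List.slice seg (some 0) (some 1)
    ++ (PySem.List.slice seg (some 1) (some (k : Int))).map pvFmtInc
    ++ PySem.List.slice seg (some (k : Int)) none

def process_module_includes_alt (orig_content : String) : String :=
  let segs := (PySem.Str.splitlines orig_content).foldl pvSegStep [[]]
  PySem.Str.join "\r\n"
    ((segs.drop 1).foldl (fun out seg => out ++ pvProcSeg seg) (segs.headD []))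

-- ===== PRECONDITION & SPEC =====
def Spec_process_module_includes (orig_content : String) (out : String) : Prop := out = process_module_includes_alt orig_content
instance (orig_content : String) (out : String) : Decidable (Spec_process_module_includes orig_content out) := by unfold Spec_process_module_includes; infer_instance

-- ===== CLAIM (what is proved, stated in full; the proofs are below) =====
def Claim_equal_process_module_includes : Prop := ∀ (orig_content : String), Dom_process_module_includes orig_content → Spec_process_module_includes orig_content (process_module_includes orig_content)

-- ===== LEMMAS AND PROOFS =====

-- a line starting with "## Includes:" does not start with "-"
lemma pv_hdr_not_dash (l : String) (h : PySem.Str.startswith l "## Includes:" = true) :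
    PySem.Str.startswith l "-" = false := by
  simp only [PySem.Str.startswith_eq] at *
  rw [PySem.Chars.startswith_iff] at h
  by_contra hc
  rw [Bool.not_eq_false, PySem.Chars.startswith_iff] at hc
  obtain ⟨t1, e1⟩ := h
  obtain ⟨t2, e2⟩ := hc
  rw [← e1] at e2
  simp at e2

-- reference description of A's behaviour: outer walk / inner dash-run walk (proof-only)
mutual
def pvGoB : List String → List String
  | [] => []
  | l :: rest =>
    if PySem.Str.startswith l "## Includes:" then l :: pvInnerB rest
    else l :: pvGoB rest
  termination_by ls => (ls.length, 0)
def pvInnerB : List String → List String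
  | [] => []
  | l :: rest =>
    if PySem.Str.startswith l "-" then pvFmtInc l :: pvInnerB rest
    else pvGoB (l :: rest)
  termination_by ls => (ls.length, 1)
end

-- A's fold with flag f produces exactly the reference (inner for f = true, outer for f = false) output
lemma pv_loop_eq (ls : List String) : ∀ (acc : List String) (f : Bool),
    (ls.foldl pvStepA (acc, f)).1 = acc ++ (if f then pvInnerB ls else pvGoB ls) := by
  induction ls with
  | nil => intro acc f; cases f <;> simp [pvGoB, pvInnerB]
  | cons l rest ih =>
    intro acc f
    by_cases h1 : PySem.Str.startswith l "## Includes:" = true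
    · have hd := pv_hdr_not_dash l h1
      simp only [PySem.Str.startswith_eq] at h1 hd
      simp at h1 hd
      cases f <;>
        simp [List.foldl_cons, pvStepA, h1, ih, pvGoB, pvInnerB, hd]
    · simp only [PySem.Str.startswith_eq] at h1
      simp at h1
      cases f with
      | false => simp [List.foldl_cons, pvStepA, h1, ih, pvGoB]
      | true =>
        by_cases h2 : PySem.Str.startswith l "-" = true
        all_goals simp only [PySem.Str.startswith_eq] at h2
        all_goals simp at h2
        · simp [List.foldl_cons, pvStepA, h1, h2, ih, pvInnerB]
        · simp [List.foldl_cons, pvStepA, h1, h2, ih, pvInnerB, pvGoB]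

-- reference description of B's stage 1 (proof-only): (current segment, later segments), built front to back
def pvSegs : List String → List String × List (List String)
  | [] => ([], [])
  | l :: ls =>
    let p := pvSegs ls
    if PySem.Str.startswith l "## Includes:" then ([], (l :: p.1) :: p.2) else (l :: p.1, p.2)

lemma pv_appendLast_eq (S : List (List String)) (c : List String) (l : String) :
    pvAppendLast (S ++ [c]) l = S ++ [c ++ [l]] := by
  match S with
  | [] => rfl
  | [s] => rfl
  | s :: s' :: S' =>
    have ih := pv_appendLast_eq (s' :: S') c l
    show pvAppendLast (s :: ((s' :: S') ++ [c])) l = s :: ((s' :: S') ++ [c ++ [l]])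
    rw [show (s' :: S') ++ [c] = s' :: (S' ++ [c]) from rfl]
    rw [show pvAppendLast (s :: s' :: (S' ++ [c])) l
          = s :: pvAppendLast (s' :: (S' ++ [c])) l from rfl]
    rw [show s' :: (S' ++ [c]) = (s' :: S') ++ [c] from rfl, ih]

lemma pv_segStep_eq (ls : List String) : ∀ (S : List (List String)) (c : List String),
    ls.foldl pvSegStep (S ++ [c]) = S ++ ((c ++ (pvSegs ls).1) :: (pvSegs ls).2) := by
  induction ls with
  | nil => intro S c; simp [pvSegs]
  | cons l ls ih =>
    intro S c
    by_cases h1 : PySem.Str.startswith l "## Includes:" = true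
    · have e : pvSegStep (S ++ [c]) l = (S ++ [c]) ++ [[l]] := by
        unfold pvSegStep; rw [if_pos h1]
      rw [List.foldl_cons, e, ih (S ++ [c]) [l]]
      simp only [pvSegs]
      rw [if_pos h1]
      simp
    · have e : pvSegStep (S ++ [c]) l = S ++ [c ++ [l]] := by
        unfold pvSegStep; rw [if_neg h1, pv_appendLast_eq]
      rw [List.foldl_cons, e, ih S (c ++ [l])]
      simp only [pvSegs]
      rw [if_neg h1]
      simp

-- reference description of B's stage 2 on a segment body (proof-only)
def pvBody : List String → List String
  | [] => []
  | x :: h => if PySem.Str.startswith x "-" then pvFmtInc x :: pvBody h else x :: h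

lemma pv_countDash_eq (seg : List String) (k : Nat) :
    pvCountDash seg k = k + ((seg.drop k).takeWhile (fun s => PySem.Str.startswith s "-")).length := by
  by_cases h : k < seg.length
  · have hdrop : seg.drop k = seg[k] :: seg.drop (k + 1) := List.drop_eq_getElem_cons h
    by_cases hd : PySem.Str.startswith seg[k] "-" = true
    · rw [pvCountDash]
      rw [dif_pos h, if_pos hd, pv_countDash_eq seg (k + 1), hdrop,
        List.takeWhile_cons, if_pos hd, List.length_cons]
      omega
    · rw [pvCountDash]
      rw [dif_pos h, if_neg hd, hdrop, List.takeWhile_cons, if_neg hd]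
      rfl
  · rw [pvCountDash]
    rw [dif_neg h, List.drop_eq_nil_of_le (by omega : seg.length ≤ k)]
    rfl
termination_by seg.length - k

lemma pv_take_drop_body (h : List String) :
    (h.take ((h.takeWhile (fun s => PySem.Str.startswith s "-")).length)).map pvFmtInc
      ++ h.drop ((h.takeWhile (fun s => PySem.Str.startswith s "-")).length) = pvBody h := by
  induction h with
  | nil => rfl
  | cons x h ih =>
    by_cases hd : PySem.Str.startswith x "-" = true
    · rw [List.takeWhile_cons, if_pos hd, List.length_cons, List.take_succ_cons,
        List.drop_succ_cons, List.map_cons, List.cons_append, ih]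
      rw [show pvBody (x :: h) = if PySem.Str.startswith x "-" then pvFmtInc x :: pvBody h
            else x :: h from rfl, if_pos hd]
    · rw [List.takeWhile_cons, if_neg hd, List.length_nil, List.take_zero, List.drop_zero,
        List.map_nil, List.nil_append]
      rw [show pvBody (x :: h) = if PySem.Str.startswith x "-" then pvFmtInc x :: pvBody h
            else x :: h from rfl, if_neg hd]

lemma pv_procSeg_cons (l : String) (h : List String) :
    pvProcSeg (l :: h) = l :: pvBody h := by
  have hk : pvCountDash (l :: h) 1
      = 1 + (h.takeWhile (fun s => PySem.Str.startswith s "-")).length := by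
    rw [pv_countDash_eq]; rfl
  show PySem.List.slice (l :: h) (some 0) (some 1)
      ++ (PySem.List.slice (l :: h) (some 1) (some ((pvCountDash (l :: h) 1 : Nat) : Int))).map pvFmtInc
      ++ PySem.List.slice (l :: h) (some ((pvCountDash (l :: h) 1 : Nat) : Int)) none
      = l :: pvBody h
  rw [hk, Nat.cast_add, Nat.cast_one]
  rw [PySem.List.slice_toNat (l :: h) (by norm_num) (by norm_num)]
  rw [PySem.List.slice_toNat (l :: h) (by norm_num) (by positivity)]
  rw [PySem.List.slice_from (l :: h) (by positivity)]
  rw [show ((0 : Int)).toNat = 0 from rfl, show ((1 : Int)).toNat = 1 from rfl]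
  rw [show ((1 : Int) + ((h.takeWhile (fun s => PySem.Str.startswith s "-")).length : Int)).toNat
        = 1 + (h.takeWhile (fun s => PySem.Str.startswith s "-")).length by omega]
  simp only [List.drop_zero, List.take_succ_cons, List.take_zero, List.drop_succ_cons,
    Nat.add_sub_cancel_left, List.cons_append, List.nil_append]
  rw [Nat.add_comm 1, List.drop_succ_cons, pv_take_drop_body]

-- B's two stages reproduce the reference walk (both statements together; each step uses both)
lemma pv_MK (ls : List String) :
    ((pvSegs ls).1 ++ ((pvSegs ls).2.flatMap pvProcSeg) = pvGoB ls)
    ∧ (pvBody (pvSegs ls).1 ++ ((pvSegs ls).2.flatMap pvProcSeg) = pvInnerB ls) := by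
  induction ls with
  | nil => constructor <;> simp [pvSegs, pvGoB, pvInnerB, pvBody]
  | cons x ls ih =>
    obtain ⟨ihM, ihK⟩ := ih
    by_cases h1 : PySem.Str.startswith x "## Includes:" = true
    · have hd : ¬ PySem.Str.startswith x "-" = true := by
        rw [pv_hdr_not_dash x h1]; simp
      have hG : pvGoB (x :: ls) = x :: pvInnerB ls := by
        rw [pvGoB, if_pos h1]
      have hseg : pvSegs (x :: ls) = ([], (x :: (pvSegs ls).1) :: (pvSegs ls).2) := by
        simp only [pvSegs]; rw [if_pos h1]
      constructor
      · rw [hseg, hG]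
        simp only [List.nil_append, List.flatMap_cons, pv_procSeg_cons, List.cons_append]
        rw [ihK]
      · rw [hseg]
        rw [show pvInnerB (x :: ls) = pvGoB (x :: ls) from by rw [pvInnerB, if_neg hd], hG]
        rw [show pvBody ([] : List String) = [] from rfl]
        simp only [List.nil_append, List.flatMap_cons, pv_procSeg_cons, List.cons_append]
        rw [ihK]
    · have hseg : pvSegs (x :: ls) = (x :: (pvSegs ls).1, (pvSegs ls).2) := by
        simp only [pvSegs]; rw [if_neg h1]
      have hG : pvGoB (x :: ls) = x :: pvGoB ls := by
        rw [pvGoB, if_neg h1]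
      constructor
      · rw [hseg, hG]
        simp only [List.cons_append]
        rw [ihM]
      · rw [hseg]
        by_cases h2 : PySem.Str.startswith x "-" = true
        · rw [show pvInnerB (x :: ls) = pvFmtInc x :: pvInnerB ls from by rw [pvInnerB, if_pos h2]]
          rw [show pvBody (x :: (pvSegs ls).1)
                = pvFmtInc x :: pvBody (pvSegs ls).1 from by rw [pvBody, if_pos h2]]
          simp only [List.cons_append]
          rw [ihK]
        · rw [show pvInnerB (x :: ls) = pvGoB (x :: ls) from by rw [pvInnerB, if_neg h2], hG]
          rw [show pvBody (x :: (pvSegs ls).1)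
                = x :: (pvSegs ls).1 from by rw [pvBody, if_neg h2]]
          simp only [List.cons_append]
          rw [ihM]

-- ===== VERDICT (by name: the statement is the Claim_ definition above) =====
theorem process_module_includes_spec : Claim_equal_process_module_includes := by
  intro orig_content _
  unfold Spec_process_module_includes process_module_includes process_module_includes_alt
  rw [pv_loop_eq]
  have hseg := pv_segStep_eq (PySem.Str.splitlines orig_content) [] []
  simp only [List.nil_append] at hseg
  show PySem.Str.join "\r\n" ([] ++ if false = true then pvInnerB (PySem.Str.splitlines orig_content)
        else pvGoB (PySem.Str.splitlines orig_content))
    = PySem.Str.join "\r\n"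
        ((((PySem.Str.splitlines orig_content).foldl pvSegStep [[]]).drop 1).foldl
          (fun out seg => out ++ pvProcSeg seg)
          (((PySem.Str.splitlines orig_content).foldl pvSegStep [[]]).headD []))
  rw [hseg]
  rw [List.drop_one, List.tail_cons, List.headD_cons]
  rw [PySem.List.foldl_append_eq_flatMap]
  rw [(pv_MK (PySem.Str.splitlines orig_content)).1]
  simp
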